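-- pv_equiv track=rewrite | github.com/swarka7/CodeScope | src/codescope/debugging/failure_signals.py | _domain_words
-- ===== SOURCE A (Python) =====
-- _STOP_WORDS = frozenset(
--     {
--         "and",
--         "assert",
--         "class",
--         "did",
--         "does",
--         "error",
--         "expected",
--         "failed",
--         "false",
--         "for",
--         "from",
--         "got",
--         "is",
--         "not",
--         "none",
--         "pytest",
--         "raise",
--         "raises",
--         "should",
--         "test",
--         "tests",
--         "the",
--         "true",
--         "with",
--     }
-- )
--
-- def _domain_words(tokens: list[str]) -> list[str]:
--     words: list[str] = []
--     for token in tokens: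
--         if len(token) <= 2:
--             continue
--         if token in _STOP_WORDS:
--             continue
--         words.append(token)
--     return _dedupe(words)
--
-- def _dedupe(values: list[str]) -> list[str]:
--     seen: set[str] = set()
--     result: list[str] = []
--     for value in values:
--         key = value.lower()
--         if key in seen:
--             continue
--         seen.add(key)
--         result.append(value)
--     return result
-- ===== SOURCE B (Python) =====
-- _STOP_WORDS = frozenset(
--     {
--         "and", "assert", "class", "did", "does", "error", "expected",
--         "failed", "false", "for", "from", "got", "is", "not", "none",
--         "pytest", "raise", "raises", "should", "test", "tests", "the",
--         "true", "with",
--     }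
-- )
--
-- def _domain_words(tokens: list[str]) -> list[str]:
--     # Positional formulation instead of A's streaming seen-set: a backward
--     # index pass overwrites first[key] so it ends at the FIRST index of each
--     # lowercase key among the acceptable tokens; a token is then kept iff it
--     # is acceptable and sits exactly at its key's first index.
--     def _ok(t: str) -> bool:
--         return len(t) > 2 and t not in _STOP_WORDS
--
--     first: dict[str, int] = {}
--     for i, t in reversed(list(enumerate(tokens))):
--         if _ok(t):
--             first[t.lower()] = i
--     return [t for i, t in enumerate(tokens) if _ok(t) and first[t.lower()] == i]
-- ===== Notes on version B (the rewrite author's own statement) =====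
-- stated objective: alternative
-- what changed: Replaces A's streaming pipeline (filter pass then a seen-set/result-accumulator dedupe loop) with a positional two-phase algorithm: a backward index pass overwrites a dict so it holds each lowercase key's first acceptable index, then a comprehension keeps exactly the tokens sitting at their key's first index.
import Mathlib
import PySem

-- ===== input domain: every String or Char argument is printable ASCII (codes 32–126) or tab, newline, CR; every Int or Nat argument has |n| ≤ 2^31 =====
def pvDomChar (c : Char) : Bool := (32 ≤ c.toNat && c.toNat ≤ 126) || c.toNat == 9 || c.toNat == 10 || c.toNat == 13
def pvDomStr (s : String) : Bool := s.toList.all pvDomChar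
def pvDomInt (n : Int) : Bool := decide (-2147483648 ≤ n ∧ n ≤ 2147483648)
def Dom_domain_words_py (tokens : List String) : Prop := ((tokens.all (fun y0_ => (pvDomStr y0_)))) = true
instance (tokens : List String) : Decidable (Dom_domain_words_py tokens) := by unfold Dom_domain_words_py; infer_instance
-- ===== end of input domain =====

-- B replaces A's streaming seen-set pipeline by a positional two-phase algorithm: a backward
-- index pass records each lowercase key's first acceptable index, then tokens at their key's
-- first index are kept.

-- ===== PORT A =====
def pvStopWords : PySem.Set String :=
  PySem.Set.ofList ["and", "assert", "class", "did", "does", "error", "expected",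
    "failed", "false", "for", "from", "got", "is", "not", "none",
    "pytest", "raise", "raises", "should", "test", "tests", "the",
    "true", "with"]

-- _dedupe: loop over values with state (seen, result)
def pvDedupe (values : List String) : List String :=
  (values.foldl
    (fun (st : PySem.Set String × List String) value =>
      let key := PySem.Str.lower value
      if PySem.Set.contains st.1 key then st
      else (PySem.Set.add st.1 key, st.2 ++ [value]))
    (PySem.Set.empty, [])).2

def domain_words_py (tokens : List String) : List String :=
  let words := tokens.foldl
    (fun (ws : List String) token =>
      if PySem.Str.len token ≤ 2 then ws
      else if PySem.Set.contains pvStopWords token then ws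
      else ws ++ [token]) []
  pvDedupe words

-- ===== PORT B =====
def pvOk (t : String) : Bool :=
  decide (2 < PySem.Str.len t) && !(PySem.Set.contains pvStopWords t)

-- backward pass: for i, t in reversed(list(enumerate(tokens))): if _ok(t): first[t.lower()] = i
def pvFirstIdx (tokens : List String) : PySem.Dict String Int :=
  ((PySem.List.enumerate tokens 0).reverse).foldl
    (fun d p => if pvOk p.2 then PySem.Dict.insert d (PySem.Str.lower p.2) p.1 else d)
    PySem.Dict.empty

def domain_words_py_alt (tokens : List String) : List String :=
  let first := pvFirstIdx tokens
  ((PySem.List.enumerate tokens 0).filter (fun p =>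
      pvOk p.2 && (PySem.Dict.get? first (PySem.Str.lower p.2) == some p.1))).map (·.2)

-- ===== PRECONDITION & SPEC =====
def Spec_domain_words_py (tokens : List String) (out : List String) : Prop := out = domain_words_py_alt tokens
instance (tokens : List String) (out : List String) : Decidable (Spec_domain_words_py tokens out) := by unfold Spec_domain_words_py; infer_instance

-- ===== CLAIM (what is proved, stated in full; the proofs are below) =====
def Claim_equal_domain_words_py : Prop := ∀ (tokens : List String), Dom_domain_words_py tokens → Spec_domain_words_py tokens (domain_words_py tokens)

-- ===== LEMMAS AND PROOFS =====

-- the dedupe step, named for the proofs (definitionally the lambda inside pvDedupe)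
def pvDStep (st : PySem.Set String × List String) (value : String) : PySem.Set String × List String :=
  let key := PySem.Str.lower value
  if PySem.Set.contains st.1 key then st
  else (PySem.Set.add st.1 key, st.2 ++ [value])

theorem pvDedupe_eq (values : List String) :
    pvDedupe values = (values.foldl pvDStep (PySem.Set.empty, [])).2 := rfl

-- "lookback" recursion: keep t iff ok and no ok-token of same lowercase in the prefix
def pvLB (pref : List String) : List String → List String
  | [] => []
  | t :: rest =>
      (if pvOk t && !(pref.any (fun u => pvOk u && (PySem.Str.lower u == PySem.Str.lower t)))
       then [t] else []) ++ pvLB (pref ++ [t]) rest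

theorem pvOk_true_iff (t : String) :
    pvOk t = true ↔ ¬ (PySem.Str.len t ≤ 2) ∧ PySem.Set.contains pvStopWords t = false := by
  unfold pvOk
  rw [Bool.and_eq_true, decide_eq_true_iff, Bool.not_eq_true']
  constructor <;> rintro ⟨h1, h2⟩ <;> exact ⟨by omega, h2⟩

-- A's filter loop is List.filter pvOk
theorem pvA_filter (ts : List String) (acc : List String) :
    ts.foldl (fun ws token =>
      if PySem.Str.len token ≤ 2 then ws
      else if PySem.Set.contains pvStopWords token then ws
      else ws ++ [token]) acc = acc ++ ts.filter pvOk := by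
  induction ts generalizing acc with
  | nil => simp
  | cons t rest ih =>
    rw [List.foldl_cons, List.filter_cons]
    by_cases h1 : PySem.Str.len t ≤ 2
    · have hok : pvOk t = false := by
        rw [Bool.eq_false_iff]; intro h; exact ((pvOk_true_iff t).mp h).1 h1
      rw [if_pos h1, hok, if_neg (by simp), ih]
    · by_cases h2 : PySem.Set.contains pvStopWords t = true
      · have hok : pvOk t = false := by
          rw [Bool.eq_false_iff]; intro h
          rw [((pvOk_true_iff t).mp h).2] at h2; exact Bool.false_ne_true h2
        rw [if_neg h1, if_pos h2, hok, if_neg (by simp), ih]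
      · have hok : pvOk t = true :=
          (pvOk_true_iff t).mpr ⟨h1, Bool.eq_false_iff.mpr h2⟩
        rw [if_neg h1, if_neg h2, hok, if_pos rfl, ih]; simp

-- the dedupe loop over the ok-filtered list equals the lookback recursion,
-- provided seen = {lowercase forms of the ok-tokens of the prefix}
theorem pvDedupe_lookback (ts : List String) (pref : List String)
    (s : PySem.Set String) (acc : List String)
    (hs : ∀ k, PySem.Set.contains s k = pref.any (fun u => pvOk u && (PySem.Str.lower u == k))) :
    ((ts.filter pvOk).foldl pvDStep (s, acc)).2 = acc ++ pvLB pref ts := by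
  induction ts generalizing pref s acc with
  | nil => simp [pvLB]
  | cons t rest ih =>
    rw [List.filter_cons, pvLB]
    by_cases hok : pvOk t = true
    · rw [hok, if_pos rfl, List.foldl_cons, Bool.true_and]
      by_cases hc : PySem.Set.contains s (PySem.Str.lower t) = true
      · have hpref : pref.any (fun u => pvOk u && (PySem.Str.lower u == PySem.Str.lower t)) = true := by
          rw [← hs]; exact hc
        have hstep : pvDStep (s, acc) t = (s, acc) := by
          unfold pvDStep; rw [if_pos hc]
        rw [hstep, ih (pref ++ [t]) s acc ?_, hpref]
        · simp
        · intro k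
          rw [hs k, List.any_append, List.any_cons, List.any_nil, hok]
          by_cases hk : PySem.Str.lower t == k
          · have : PySem.Str.lower t = k := by simpa using hk
            rw [← this, hpref]; simp
          · rw [Bool.eq_false_iff.mpr (fun h => hk h)]; simp
      · have hpref : pref.any (fun u => pvOk u && (PySem.Str.lower u == PySem.Str.lower t)) = false := by
          rw [← hs]; exact Bool.eq_false_iff.mpr hc
        have hstep : pvDStep (s, acc) t = (PySem.Set.add s (PySem.Str.lower t), acc ++ [t]) := by
          unfold pvDStep; rw [if_neg hc]
        rw [hstep, ih (pref ++ [t]) _ (acc ++ [t]) ?_, hpref]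
        · simp
        · intro k
          rw [List.any_append, List.any_cons, List.any_nil, hok, ← hs k]
          have hmem : PySem.Set.contains (PySem.Set.add s (PySem.Str.lower t)) k = true
              ↔ (k ∈ s ∨ k = PySem.Str.lower t) := by
            rw [PySem.Set.contains_iff, PySem.Set.mem_add]
          have hcmem : PySem.Set.contains s k = true ↔ k ∈ s := PySem.Set.contains_iff s k
          by_cases hk : k ∈ s ∨ k = PySem.Str.lower t
          · rw [hmem.mpr hk]
            rcases hk with hk | hk
            · rw [hcmem.mpr hk]; simp
            · subst hk; simp
          · rw [Bool.eq_false_iff.mpr (fun h => hk (hmem.mp h))]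
            push Not at hk
            rw [Bool.eq_false_iff.mpr (fun h => hk.1 (hcmem.mp h))]
            have : (PySem.Str.lower t == k) = false := by
              refine Bool.eq_false_iff.mpr (fun h => hk.2 ?_)
              exact (eq_of_beq h).symm
            rw [this]; simp
    · have hok' : pvOk t = false := Bool.eq_false_iff.mpr hok
      rw [hok', if_neg (by simp), Bool.false_and, if_neg (by simp), List.nil_append]
      apply ih (pref ++ [t]) s acc
      intro k
      rw [hs k, List.any_append, List.any_cons, List.any_nil, hok']
      simp

-- pvLF s k ts = the index (offset s) of the first acceptable token of ts with lowercase k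
def pvLF (s : Int) (k : String) : List String → Option Int
  | [] => none
  | u :: rest => if pvOk u && (PySem.Str.lower u == k) then some s else pvLF (s + 1) k rest

-- generalized backward-pass dict
def pvFIAux (ts : List String) (s : Int) : PySem.Dict String Int :=
  ((PySem.List.enumerate ts s).reverse).foldl
    (fun d p => if pvOk p.2 then PySem.Dict.insert d (PySem.Str.lower p.2) p.1 else d)
    PySem.Dict.empty

-- the backward overwrite pass computes exactly the first-occurrence index
theorem pvFIAux_get (ts : List String) (s : Int) (k : String) :
    PySem.Dict.get? (pvFIAux ts s) k = pvLF s k ts := by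
  induction ts generalizing s with
  | nil => simp [pvFIAux, pvLF, PySem.List.enumerate_nil, PySem.Dict.get?_empty]
  | cons t rest ih =>
    unfold pvFIAux pvLF
    rw [PySem.List.enumerate_cons, List.reverse_cons, List.foldl_append, List.foldl_cons,
      List.foldl_nil]
    by_cases hok : pvOk t = true
    · rw [hok, if_pos rfl, Bool.true_and, PySem.Dict.get?_insert]
      by_cases hk : k = PySem.Str.lower t
      · rw [if_pos hk, if_pos (by simp [hk])]
      · rw [if_neg hk, if_neg (by simp only [beq_iff_eq]; exact fun h => hk h.symm)]
        exact ih (s + 1)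
    · rw [Bool.eq_false_iff.mpr hok, if_neg (by simp), Bool.false_and, if_neg (by simp)]
      exact ih (s + 1)

theorem pvLF_bounds (ts : List String) (s : Int) (k : String) (m : Int)
    (h : pvLF s k ts = some m) : s ≤ m ∧ m < s + ts.length := by
  induction ts generalizing s with
  | nil => simp [pvLF] at h
  | cons t rest ih =>
    unfold pvLF at h
    split at h
    · cases h
      simp only [List.length_cons]
      push_cast
      omega
    · have := ih (s + 1) h
      simp only [List.length_cons]
      push_cast
      omega

theorem pvLF_append (xs ys : List String) (s : Int) (k : String) :
    pvLF s k (xs ++ ys) = (pvLF s k xs).or (pvLF (s + xs.length) k ys) := by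
  induction xs generalizing s with
  | nil => simp [pvLF]
  | cons x rest ih =>
    rw [List.cons_append]
    unfold pvLF
    by_cases h : (pvOk x && (PySem.Str.lower x == k)) = true
    · rw [if_pos h, if_pos h]
      rfl
    · rw [if_neg h, if_neg h, ih (s + 1)]
      have hlen : s + 1 + (rest.length : Int) = s + ((x :: rest).length : Int) := by
        simp only [List.length_cons]; push_cast; ring
      rw [hlen]
      cases ys <;> rfl

theorem pvLF_none_iff (xs : List String) (s : Int) (k : String) :
    pvLF s k xs = none ↔ xs.any (fun u => pvOk u && (PySem.Str.lower u == k)) = false := by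
  induction xs generalizing s with
  | nil => simp [pvLF]
  | cons x rest ih =>
    unfold pvLF
    rw [List.any_cons]
    by_cases h : (pvOk x && (PySem.Str.lower x == k)) = true
    · rw [if_pos h, h]
      simp
    · rw [if_neg h, ih (s + 1), Bool.eq_false_iff.mpr h]
      simp

-- bridge: an acceptable token sits at its key's first index iff no earlier acceptable
-- token shares its lowercase form
theorem pvFirst_bridge (L : List String) (j : Nat) (t : String) (rest : List String)
    (hts : t :: rest = L.drop j) (hok : pvOk t = true) :
    (PySem.Dict.get? (pvFirstIdx L) (PySem.Str.lower t) == some (j : Int))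
      = !((L.take j).any (fun u => pvOk u && (PySem.Str.lower u == PySem.Str.lower t))) := by
  have hj : j ≤ L.length := by
    by_contra h
    rw [List.drop_eq_nil_of_le (by omega)] at hts
    exact List.cons_ne_nil t rest hts
  have hsplit : L = L.take j ++ (t :: rest) := by
    rw [hts]; exact (List.take_append_drop j L).symm
  have hlen : (L.take j).length = j := List.length_take_of_le hj
  have hfix : PySem.Dict.get? (pvFirstIdx L) (PySem.Str.lower t)
      = pvLF 0 (PySem.Str.lower t) L := pvFIAux_get L 0 (PySem.Str.lower t)
  rw [hfix]
  conv_lhs => rw [hsplit]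
  rw [pvLF_append, hlen]
  have hhead : pvLF (0 + (j : Int)) (PySem.Str.lower t) (t :: rest) = some ((j : Int)) := by
    unfold pvLF
    rw [if_pos (by simp [hok])]
    norm_num
  rw [hhead]
  by_cases hany : (L.take j).any (fun u => pvOk u && (PySem.Str.lower u == PySem.Str.lower t)) = true
  · rw [hany]
    have hne : pvLF 0 (PySem.Str.lower t) (L.take j) ≠ none := fun hn => by
      rw [(pvLF_none_iff _ _ _).mp hn] at hany; exact Bool.false_ne_true hany
    obtain ⟨m, hm⟩ := Option.ne_none_iff_exists'.mp hne
    have hb := pvLF_bounds _ _ _ _ hm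
    rw [hm]
    simp only [Option.or_some]
    have : m ≠ (j : Int) := by
      rw [hlen] at hb
      omega
    simp [this]
  · have hnone : pvLF 0 (PySem.Str.lower t) (L.take j) = none :=
      (pvLF_none_iff _ _ _).mpr (Bool.eq_false_iff.mpr hany)
    rw [hnone, Bool.eq_false_iff.mpr hany]
    simp

-- B's selection comprehension equals the lookback recursion
theorem pvB_lookback (L : List String) (j : Nat) (ts : List String)
    (hts : ts = L.drop j) :
    ((PySem.List.enumerate ts (j : Int)).filter (fun p =>
        pvOk p.2 && (PySem.Dict.get? (pvFirstIdx L) (PySem.Str.lower p.2) == some p.1))).map (·.2)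
      = pvLB (L.take j) ts := by
  induction ts generalizing j with
  | nil => simp [pvLB, PySem.List.enumerate_nil]
  | cons t rest ih =>
    rw [PySem.List.enumerate_cons, List.filter_cons]
    have hrest : rest = L.drop (j + 1) := by
      have h := congrArg List.tail hts
      simpa [List.tail_drop] using h
    have hget : L[j]? = some t := by
      have h0 : (L.drop j)[0]? = some t := by rw [← hts]; rfl
      simpa [List.getElem?_drop] using h0
    have htake : L.take (j + 1) = L.take j ++ [t] := by
      rw [List.take_add_one, hget]; rfl
    have hcast : (j : Int) + 1 = ((j + 1 : Nat) : Int) := by push_cast; ring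
    rw [pvLB]
    by_cases hok : pvOk t = true
    · have hbr := pvFirst_bridge L j t rest hts hok
      have hcond : (pvOk ((j : Int), t).2 &&
          (PySem.Dict.get? (pvFirstIdx L) (PySem.Str.lower ((j : Int), t).2)
            == some ((j : Int), t).1))
          = (pvOk t && !((L.take j).any
              (fun u => pvOk u && (PySem.Str.lower u == PySem.Str.lower t)))) := by
        show (pvOk t && _) = _
        rw [hbr]
      rw [hcond]
      by_cases hP : (pvOk t && !((L.take j).any
          (fun u => pvOk u && (PySem.Str.lower u == PySem.Str.lower t)))) = true
      · rw [if_pos hP, if_pos hP, List.map_cons, hcast, ih (j + 1) hrest, htake]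
        rfl
      · rw [if_neg hP, if_neg hP, List.nil_append, hcast, ih (j + 1) hrest, htake]
    · have hok' : pvOk t = false := Bool.eq_false_iff.mpr hok
      have : (pvOk ((j : Int), t).2 &&
          (PySem.Dict.get? (pvFirstIdx L) (PySem.Str.lower ((j : Int), t).2)
            == some ((j : Int), t).1)) = false := by
        show (pvOk t && _) = false
        rw [hok', Bool.false_and]
      rw [this, if_neg (by simp), hok', Bool.false_and, if_neg (by simp), List.nil_append,
        hcast, ih (j + 1) hrest, htake]

-- ===== VERDICT (by name: the statement is the Claim_ definition above) =====
theorem domain_words_py_spec : Claim_equal_domain_words_py := by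
  intro tokens _
  show domain_words_py tokens = domain_words_py_alt tokens
  have hA : domain_words_py tokens = pvDedupe (tokens.filter pvOk) := by
    unfold domain_words_py
    rw [pvA_filter tokens []]
    rfl
  have hD : pvDedupe (tokens.filter pvOk) = pvLB [] tokens := by
    rw [pvDedupe_eq]
    have h := pvDedupe_lookback tokens [] PySem.Set.empty []
      (by intro k; simp [PySem.Set.contains, PySem.Set.empty])
    simpa using h
  have hB : domain_words_py_alt tokens = pvLB [] tokens := by
    unfold domain_words_py_alt
    have h := pvB_lookback tokens 0 tokens (by simp)
    simpa using h
  rw [hA, hD, hB]
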